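-- pv_equiv track=rewrite | github.com/goodsosbva/JS_Algorithm-DataStructuer | codingTest/dp/땅따먹기.py | solution
-- ===== SOURCE A (Python) =====
-- def solution(land):
--     length = len(land)
--
--     for i in range(1, length):
--         for j in range(4):
--             isMaxs = []
--             for a in range(4):
--                 if a == j: continue
--
--                 isMaxs.append(land[i - 1][a])
--             land[i][j] = land[i][j] + max(isMaxs)
--
--     return max(land[length - 1])
-- ===== SOURCE B (Python) =====
-- def solution(land):
--     for i in range(1, len(land)):
--         row4 = land[i - 1][:4]
--         max1 = max(row4)
--         argmax = row4.index(max1)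
--         max2 = max(row4[:argmax] + row4[argmax + 1:])
--         for j in range(4):
--             land[i][j] += max2 if j == argmax else max1
--     return max(land[-1])
-- ===== Notes on version B (the rewrite author's own statement) =====
-- stated objective: alternative
-- what changed: B replaces A's per-column 4x4 inner scan (rebuilding and maxing a 3-element list for each of the 4 columns) by one top-two precomputation per row (max value, its first index, and the max excluding that index), then a single shaped pass adding max2 at the argmax column and max1 elsewhere.
import Mathlib
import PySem

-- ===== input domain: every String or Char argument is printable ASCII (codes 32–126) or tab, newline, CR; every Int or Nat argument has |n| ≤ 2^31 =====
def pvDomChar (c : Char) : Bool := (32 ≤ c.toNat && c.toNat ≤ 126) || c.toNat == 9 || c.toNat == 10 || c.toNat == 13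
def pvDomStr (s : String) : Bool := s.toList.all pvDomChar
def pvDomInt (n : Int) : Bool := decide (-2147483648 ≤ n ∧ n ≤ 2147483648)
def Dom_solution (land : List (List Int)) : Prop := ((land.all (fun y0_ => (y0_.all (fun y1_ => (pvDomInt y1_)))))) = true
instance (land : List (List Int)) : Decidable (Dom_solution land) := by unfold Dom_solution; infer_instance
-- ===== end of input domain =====

-- B replaces A's per-column 4x4 inner scan by one top-two (max/argmax/second-max) precomputation
-- per row; both mutate `land` in place the same way, the theorems are about the return value.

-- semantics of the Python assignment land[i][j] = v (shared by both ports)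
def pvSet2 (L : List (List Int)) (i j : Nat) (v : Int) : List (List Int) :=
  L.set i ((L.getD i []).set j v)

-- ===== PORT A =====
def solution (land : List (List Int)) : Int :=
  let length := land.length
  let land' := (List.range (length - 1)).foldl (fun L k =>
    let i := k + 1
    (List.range 4).foldl (fun L j =>
      let isMaxs := ((List.range 4).filter (fun a => a ≠ j)).map
        (fun a => (L.getD (i - 1) []).getD a 0)
      pvSet2 L i j ((L.getD i []).getD j 0 + (PySem.List.max? isMaxs (fun y => y)).getD 0)) L) land
  (PySem.List.max? (land'.getD (length - 1) []) (fun y => y)).getD 0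

-- ===== PORT B =====
def solution_alt (land : List (List Int)) : Int :=
  let land' := (List.range (land.length - 1)).foldl (fun L k =>
    let i := k + 1
    let row4 := (L.getD (i - 1) []).take 4
    let max1 := (PySem.List.max? row4 (fun y => y)).getD 0
    let argmax := (PySem.List.index? row4 max1).getD 0
    let max2 := (PySem.List.max? (row4.take argmax ++ row4.drop (argmax + 1)) (fun y => y)).getD 0
    (List.range 4).foldl (fun L j =>
      pvSet2 L i j ((L.getD i []).getD j 0 + (if j = argmax then max2 else max1))) L) land
  (PySem.List.max? (land'.getD (land.length - 1) []) (fun y => y)).getD 0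

-- ===== PRECONDITION & SPEC =====
-- Pre_ is exactly where the Python A returns without raising: land nonempty; with ≥ 2 rows every
-- row needs at least 4 columns (A reads/writes columns 0..3 of every row); with exactly one row
-- only that row's nonemptiness (for the final max) is needed.
def Pre_solution (land : List (List Int)) : Prop :=
  land ≠ [] ∧ (land.length = 1 → land.headI ≠ []) ∧
    (2 ≤ land.length → ∀ r ∈ land, 4 ≤ r.length)
instance (land : List (List Int)) : Decidable (Pre_solution land) := by
  unfold Pre_solution; infer_instance

def pvWitness_solution : List (List Int) :=
  [[1, 2, 3, 5], [5, 8, 7, 0], [4, 0, 0, 7], [6, 4, 10, 0]]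

def Spec_solution (land : List (List Int)) (out : Int) : Prop := out = solution_alt land
instance (land : List (List Int)) (out : Int) : Decidable (Spec_solution land out) := by
  unfold Spec_solution; infer_instance

-- ===== CLAIM (what is proved, stated in full; the proofs are below) =====
def Claim_equal_solution : Prop :=
  ∀ (land : List (List Int)), Dom_solution land → Pre_solution land →
    Spec_solution land (solution land)

-- ===== LEMMAS AND PROOFS =====

lemma length_pvSet2 (L : List (List Int)) (i j : Nat) (v : Int) :
    (pvSet2 L i j v).length = L.length := List.length_set ..

lemma getD_pvSet2_ne (L : List (List Int)) {m i : Nat} (j : Nat) (v : Int) (h : m ≠ i) :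
    (pvSet2 L i j v).getD m [] = L.getD m [] := by
  unfold pvSet2
  rw [List.getD, List.getD, List.getElem?_set_ne (by omega)]
  rfl

lemma pvWide_pvSet2 {L : List (List Int)} (h : ∀ r ∈ L, 4 ≤ r.length) (i j : Nat) (v : Int) :
    ∀ r ∈ pvSet2 L i j v, 4 ≤ r.length := by
  intro r hr
  by_cases hi : i < L.length
  · rcases List.mem_or_eq_of_mem_set hr with h' | h'
    · exact h r h'
    · subst h'
      rw [List.length_set]
      exact h _ (List.getD_eq_getElem L [] hi ▸ List.getElem_mem hi)
  · unfold pvSet2 at hr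
    rw [List.set_eq_of_length_le (by omega)] at hr
    exact h r hr

lemma foldl_eq_of_inv {α β : Type} (P : α → Prop) (f g : α → β → α) (l : List β) (x : α)
    (hP : P x) (hpres : ∀ y b, P y → P (f y b))
    (heq : ∀ y b, b ∈ l → P y → f y b = g y b) : l.foldl f x = l.foldl g x := by
  induction l generalizing x with
  | nil => rfl
  | cons b t ih =>
      calc (b :: t).foldl f x = t.foldl f (f x b) := rfl
        _ = t.foldl g (f x b) :=
            ih (f x b) (hpres x b hP) (fun y b' hb' => heq y b' (List.mem_cons_of_mem _ hb'))
        _ = t.foldl g (g x b) := by rw [heq x b List.mem_cons_self hP]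
        _ = (b :: t).foldl g x := rfl

-- the core fact about a row of ≥ 4 integers: for each column j < 4, the max of the other three
-- columns equals max2 at the (first) argmax column and max1 elsewhere
lemma pvTopTwo (a b c d : Int) (t : List Int) (j : Nat) (hj : j < 4) :
    (PySem.List.max? (((List.range 4).filter (fun x => x ≠ j)).map
        (fun x => (a :: b :: c :: d :: t).getD x 0)) (fun y => y)).getD 0 =
      (let row4 := (a :: b :: c :: d :: t).take 4
       let max1 := (PySem.List.max? row4 (fun y => y)).getD 0
       let argmax := (PySem.List.index? row4 max1).getD 0
       let max2 := (PySem.List.max? (row4.take argmax ++ row4.drop (argmax + 1)) (fun y => y)).getD 0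
       if j = argmax then max2 else max1) := by
  have hrange : (List.range 4) = [0, 1, 2, 3] := by decide
  have htake : (a :: b :: c :: d :: t).take 4 = [a, b, c, d] := rfl
  have hmax1 : (PySem.List.max? [a, b, c, d] (fun y => y)).getD 0 = max (max (max a b) c) d := by
    rw [PySem.List.max?_id_cons]; rfl
  simp only [htake, hmax1]
  have hmem : a = max (max (max a b) c) d ∨ (¬ a = max (max (max a b) c) d ∧ b = max (max (max a b) c) d)
      ∨ (¬ a = max (max (max a b) c) d ∧ ¬ b = max (max (max a b) c) d ∧ c = max (max (max a b) c) d)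
      ∨ (¬ a = max (max (max a b) c) d ∧ ¬ b = max (max (max a b) c) d ∧ ¬ c = max (max (max a b) c) d ∧ d = max (max (max a b) c) d) := by
    simp only [max_def]; split_ifs <;> omega
  rcases hmem with h | ⟨h0, h⟩ | ⟨h0, h1, h⟩ | ⟨h0, h1, h2, h⟩
  · have hidx : (PySem.List.index? [a, b, c, d] (max (max (max a b) c) d)).getD 0 = 0 := by
      rw [← h, PySem.List.index?_cons_self]; rfl
    rw [hidx]
    interval_cases j <;>
      simp [hrange, List.filter, List.getD, PySem.List.max?_id_cons, List.take, List.drop,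
        max_def] <;>
      (try split_ifs) <;> omega
  · have hidx : (PySem.List.index? [a, b, c, d] (max (max (max a b) c) d)).getD 0 = 1 := by
      rw [PySem.List.index?_cons_of_ne _ h0, ← h, PySem.List.index?_cons_self]; rfl
    rw [hidx]
    interval_cases j <;>
      simp [hrange, List.filter, List.getD, PySem.List.max?_id_cons, List.take, List.drop,
        max_def] <;>
      (try split_ifs) <;> omega
  · have hidx : (PySem.List.index? [a, b, c, d] (max (max (max a b) c) d)).getD 0 = 2 := by
      rw [PySem.List.index?_cons_of_ne _ h0, PySem.List.index?_cons_of_ne _ h1, ← h,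
        PySem.List.index?_cons_self]; rfl
    rw [hidx]
    interval_cases j <;>
      simp [hrange, List.filter, List.getD, PySem.List.max?_id_cons, List.take, List.drop,
        max_def] <;>
      (try split_ifs) <;> omega
  · have hidx : (PySem.List.index? [a, b, c, d] (max (max (max a b) c) d)).getD 0 = 3 := by
      rw [PySem.List.index?_cons_of_ne _ h0, PySem.List.index?_cons_of_ne _ h1,
        PySem.List.index?_cons_of_ne _ h2, ← h, PySem.List.index?_cons_self]; rfl
    rw [hidx]
    interval_cases j <;>
      simp [hrange, List.filter, List.getD, PySem.List.max?_id_cons, List.take, List.drop,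
        max_def] <;>
      (try split_ifs) <;> omega

-- ===== VERDICT (by name: the statement is the Claim_ definition above) =====
theorem solution_spec : Claim_equal_solution := by
  intro land _ hpre
  obtain ⟨hne, h1, h2⟩ := hpre
  unfold Spec_solution solution solution_alt
  by_cases hlen : 2 ≤ land.length
  · refine congrArg (fun L : List (List Int) =>
      (PySem.List.max? (L.getD (land.length - 1) []) (fun y => y)).getD 0) ?_
    apply foldl_eq_of_inv (P := fun L => (∀ r ∈ L, 4 ≤ r.length) ∧ L.length = land.length)
    · exact ⟨h2 hlen, rfl⟩
    · -- preservation of the invariant by A's row step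
      intro y k ⟨hw, hl⟩
      have : ∀ (js : List Nat) (z : List (List Int)),
          (∀ r ∈ z, 4 ≤ r.length) ∧ z.length = land.length →
          (∀ r ∈ js.foldl (fun L j =>
            pvSet2 L (k + 1) j ((L.getD (k + 1) []).getD j 0 +
              (PySem.List.max? (((List.range 4).filter (fun a => a ≠ j)).map
                (fun a => (L.getD (k + 1 - 1) []).getD a 0)) (fun y => y)).getD 0)) z,
            4 ≤ r.length) ∧
          (js.foldl (fun L j =>
            pvSet2 L (k + 1) j ((L.getD (k + 1) []).getD j 0 +
              (PySem.List.max? (((List.range 4).filter (fun a => a ≠ j)).map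
                (fun a => (L.getD (k + 1 - 1) []).getD a 0)) (fun y => y)).getD 0)) z).length
            = land.length := by
        intro js
        induction js with
        | nil => exact fun z hz => hz
        | cons j t ih =>
            intro z ⟨hzw, hzl⟩
            exact ih _ ⟨pvWide_pvSet2 hzw _ _ _, by rw [length_pvSet2]; exact hzl⟩
      exact this (List.range 4) y ⟨hw, hl⟩
    · -- A's row step equals B's row step on the invariant
      intro y k hk ⟨hw, hl⟩
      have hk' : k < land.length - 1 := List.mem_range.mp hk
      have hky : k < y.length := by omega
      have hwide : 4 ≤ (y.getD k []).length := by
        refine hw _ ?_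
        exact List.getD_eq_getElem y [] hky ▸ List.getElem_mem hky
      -- the inner loops over j = 0..3
      apply foldl_eq_of_inv (P := fun L => L.getD (k + 1 - 1) [] = y.getD (k + 1 - 1) [])
      · rfl
      · intro L j hP
        rw [← hP]
        exact getD_pvSet2_ne _ _ _ (by omega)
      · intro L j hj hP
        have hj4 : j < 4 := List.mem_range.mp hj
        have hwide' : 4 ≤ (y.getD (k + 1 - 1) []).length := hwide
        obtain ⟨a, b, c, d, t, hp⟩ :
            ∃ a b c d t, y.getD (k + 1 - 1) [] = a :: b :: c :: d :: t := by
          rcases e : y.getD (k + 1 - 1) [] with _ | ⟨a, _ | ⟨b, _ | ⟨c, _ | ⟨d, t⟩⟩⟩⟩ <;>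
            first
            | exact ⟨_, _, _, _, _, rfl⟩
            | (exfalso; rw [e] at hwide'; simp at hwide')
        rw [hP, hp]
        exact congrArg
          (fun v => pvSet2 L (k + 1) j ((L.getD (k + 1) []).getD j 0 + v))
          (pvTopTwo a b c d t j hj4)
  · have hn1 : land.length = 1 := by
      rcases land with _ | ⟨r, t⟩
      · exact absurd rfl hne
      · simp at hlen ⊢; omega
    rw [hn1]
    rfl
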